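-- pv_equiv track=rewrite | github.com/kristen-fredericksen/call-number-analysis | src/analyze_852_indicators.py | strip_shelving_prefix
-- ===== SOURCE A (Python) =====
-- SHELVING_PREFIXES = [
--     'PERIODICALS', 'PERIODICAL', 'DISSERTATION', 'JUVENILE', 'REFERENCE',
--     'OVERSIZE', 'RESERVE', 'SERIALS', 'SERIAL', 'THESIS', 'QUARTO',
--     'FOLIO', 'SPEC', 'DOCS', 'JUV', 'PER', 'REF',
-- ]
--
-- def strip_shelving_prefix(cn):
--     """
--     Strip known shelving prefixes ($k values) from the beginning of a call number.
--
--     Requires the prefix to be followed by a space (word boundary) so that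
--     "REF" doesn't match inside "REFERENCE" or "RESERVED".
--
--     Returns: (stripped_cn, prefix_found)
--         - stripped_cn: the call number with the prefix removed, or the original
--         - prefix_found: the prefix that was stripped, or None
--
--     Examples:
--         "OVERSIZE G 3860 1994 .H37" → ("G 3860 1994 .H37", "OVERSIZE")
--         "DOCS Y 1.1/5:108-408" → ("Y 1.1/5:108-408", "DOCS")
--         "E 185 .5 B58" → ("E 185 .5 B58", None)
--         "REFERENCE QA76 .B3" → ("QA76 .B3", "REFERENCE")
--         "Periodical QA76.73 .P98" → ("QA76.73 .P98", "PERIODICAL")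
--     """
--     cn_upper = cn.upper()
--     for prefix in SHELVING_PREFIXES:
--         if cn_upper.startswith(prefix + ' '):
--             rest = cn[len(prefix):].lstrip()
--             if rest:
--                 return rest, prefix
--     return cn, None
-- ===== SOURCE B (Python) =====
-- SHELVING_PREFIXES = [
--     'PERIODICALS', 'PERIODICAL', 'DISSERTATION', 'JUVENILE', 'REFERENCE',
--     'OVERSIZE', 'RESERVE', 'SERIALS', 'SERIAL', 'THESIS', 'QUARTO',
--     'FOLIO', 'SPEC', 'DOCS', 'JUV', 'PER', 'REF',
-- ]
--
-- _PREFIX_SET = frozenset(SHELVING_PREFIXES)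
--
-- def strip_shelving_prefix(cn):
--     cn_upper = cn.upper()
--     i = cn_upper.find(' ')
--     if i == -1:
--         return cn, None
--     head = cn_upper[:i]
--     if head not in _PREFIX_SET:
--         return cn, None
--     rest = cn[i:].lstrip()
--     if rest:
--         return rest, head
--     return cn, None
-- ===== Notes on version B (the rewrite author's own statement) =====
-- stated objective: simpler
-- what changed: Instead of scanning all 17 prefixes with a startswith test per prefix, B extracts the first space-delimited word of the upper-cased call number once (a single find) and tests it with one lookup in a precomputed frozenset.
import Mathlib
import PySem

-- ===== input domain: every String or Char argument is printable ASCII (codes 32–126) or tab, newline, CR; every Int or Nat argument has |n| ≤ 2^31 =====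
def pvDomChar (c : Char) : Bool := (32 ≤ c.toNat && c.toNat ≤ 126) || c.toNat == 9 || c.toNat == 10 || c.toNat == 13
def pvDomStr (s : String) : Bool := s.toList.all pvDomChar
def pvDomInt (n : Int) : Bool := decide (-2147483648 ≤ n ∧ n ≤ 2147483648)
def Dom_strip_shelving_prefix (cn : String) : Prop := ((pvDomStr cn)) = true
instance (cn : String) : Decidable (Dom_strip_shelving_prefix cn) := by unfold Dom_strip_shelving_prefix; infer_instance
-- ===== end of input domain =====

-- B replaces A's 17-prefix startswith scan by extracting the first space-delimited word once
-- and testing it against a precomputed set (objective: simpler). Return value only; no mutation.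

-- ===== PORT A =====
def SHELVING_PREFIXES : List String :=
  ["PERIODICALS", "PERIODICAL", "DISSERTATION", "JUVENILE", "REFERENCE",
   "OVERSIZE", "RESERVE", "SERIALS", "SERIAL", "THESIS", "QUARTO",
   "FOLIO", "SPEC", "DOCS", "JUV", "PER", "REF"]

-- the 'for prefix in SHELVING_PREFIXES' loop of A
def stripLoopA (cn : String) (cnUpper : List Char) : List String → String × Option String
  | [] => (cn, none)
  | p :: ps =>
    if PySem.Chars.startswith cnUpper (p.toList ++ [' ']) then
      let rest := PySem.Chars.lstrip (PySem.Chars.slice cn.toList (some (p.toList.length : Int)) none)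
      if rest ≠ [] then (String.ofList rest, some p) else stripLoopA cn cnUpper ps
    else stripLoopA cn cnUpper ps

def strip_shelving_prefix (cn : String) : String × Option String :=
  stripLoopA cn (PySem.Chars.upper cn.toList) SHELVING_PREFIXES

-- ===== PORT B =====
def PREFIX_SET : PySem.Set String := PySem.Set.ofList SHELVING_PREFIXES

def strip_shelving_prefix_alt (cn : String) : String × Option String :=
  let u := PySem.Chars.upper cn.toList
  let i := PySem.Chars.find u [' ']
  if i = -1 then (cn, none)
  else
    let head := PySem.Chars.slice u none (some i)
    if PREFIX_SET.contains (String.ofList head) then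
      let rest := PySem.Chars.lstrip (PySem.Chars.slice cn.toList (some i) none)
      if rest ≠ [] then (String.ofList rest, some (String.ofList head)) else (cn, none)
    else (cn, none)

-- ===== PRECONDITION & SPEC =====
def Spec_strip_shelving_prefix (cn : String) (out : String × Option String) : Prop := out = strip_shelving_prefix_alt cn
instance (cn : String) (out : String × Option String) : Decidable (Spec_strip_shelving_prefix cn out) := by unfold Spec_strip_shelving_prefix; infer_instance

-- ===== CLAIM (what is proved, stated in full; the proofs are below) =====
def Claim_equal_strip_shelving_prefix : Prop := ∀ (cn : String), Dom_strip_shelving_prefix cn → Spec_strip_shelving_prefix cn (strip_shelving_prefix cn)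

-- ===== LEMMAS AND PROOFS =====

-- if no prefix matches, A's loop falls through to (cn, none)
theorem stripLoopA_no_match (cn : String) (u : List Char) (ps : List String)
    (h : ∀ p ∈ ps, PySem.Chars.startswith u (p.toList ++ [' ']) = false) :
    stripLoopA cn u ps = (cn, none) := by
  induction ps with
  | nil => rfl
  | cons p ps ih =>
    have hp := h p (List.mem_cons_self ..)
    simp [stripLoopA, hp]
    exact ih fun q hq => h q (List.mem_cons_of_mem _ hq)

-- with a first space at index n, 'u startswith p ++ " "' pins p to the first word u.take n
theorem match_iff (u : List Char) (n : Nat) (t : List Char) (p : List Char)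
    (hp : ' ' ∉ p)
    (hd : u.drop n = ' ' :: t)
    (hmin : ∀ j < n, ¬ [' '] <+: u.drop j) :
    (PySem.Chars.startswith u (p ++ [' ']) = true ↔ p = u.take n) := by
  rw [PySem.Chars.startswith_iff]
  constructor
  · rintro ⟨s, hs⟩
    have hu : u = p ++ ' ' :: s := by simpa using hs.symm
    have h1 : n ≤ p.length := by
      by_contra hlt
      push_neg at hlt
      apply hmin p.length hlt
      rw [hu, List.drop_left]
      exact ⟨s, rfl⟩
    have h2 : ¬ n < p.length := by
      intro hlt
      have hdrop : u.drop n = p.drop n ++ ' ' :: s := by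
        rw [hu, List.drop_append_of_le_length (le_of_lt hlt)]
      have hne : p.drop n ≠ [] := by simpa [List.drop_eq_nil_iff] using hlt
      obtain ⟨c, cs, hc⟩ := List.exists_cons_of_ne_nil hne
      have h3 : (' ' : Char) = c := by
        have h4 := hd.symm.trans hdrop
        rw [hc, List.cons_append] at h4
        exact (List.cons.inj h4).1
      apply hp
      have h5 : ' ' ∈ p.drop n := by rw [hc, ← h3]; exact List.mem_cons_self ..
      exact List.mem_of_mem_drop h5
    have hn : n = p.length := by omega
    rw [hn, hu, List.take_left]
  · intro hpe
    refine ⟨t, ?_⟩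
    calc (p ++ [' ']) ++ t = p ++ (' ' :: t) := by simp
    _ = u.take n ++ u.drop n := by rw [hpe, hd]
    _ = u := List.take_append_drop n u

-- A's loop, when the first word (u.take n) is the only candidate match
theorem stripLoopA_spec (cn : String) (u : List Char) (n : Nat) (hn : n ≤ u.length) (ps : List String)
    (H : ∀ p ∈ ps, (PySem.Chars.startswith u (p.toList ++ [' ']) = true ↔ p.toList = u.take n)) :
    stripLoopA cn u ps =
      if String.ofList (u.take n) ∈ ps then
        (if PySem.Chars.lstrip (cn.toList.drop n) ≠ [] then
          (String.ofList (PySem.Chars.lstrip (cn.toList.drop n)), some (String.ofList (u.take n)))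
         else (cn, none))
      else (cn, none) := by
  induction ps with
  | nil => simp [stripLoopA]
  | cons p ps ih =>
    have Hp := H p (List.mem_cons_self ..)
    have ihr := ih fun q hq => H q (List.mem_cons_of_mem _ hq)
    by_cases hs : PySem.Chars.startswith u (p.toList ++ [' ']) = true
    · have hpe : p.toList = u.take n := Hp.mp hs
      have hpm : p = String.ofList (u.take n) := by rw [← hpe, String.ofList_toList]
      have hlen : p.toList.length = n := by rw [hpe, List.length_take]; omega
      have hmem : String.ofList (u.take n) ∈ p :: ps := hpm ▸ List.mem_cons_self ..
      rw [if_pos hmem]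
      by_cases hr : PySem.Chars.lstrip (cn.toList.drop n) = []
      · simp [stripLoopA, hs, hlen, hr, ihr, pysem]
      · have hpfx : List.take n u ++ [' '] <+: u := by
          rw [← hpe]; exact (PySem.Chars.startswith_iff _ _).mp hs
        have hmm : (min (n:Int) (u.length:Int)).toNat = n := by omega
        simp [stripLoopA, hr, hpm, hpfx, hmm, pysem]
    · have hne : String.ofList (u.take n) ≠ p := by
        intro he
        exact hs (Hp.mpr (by rw [← he, String.toList_ofList]))
      have hs' : PySem.Chars.startswith u (p.toList ++ [' ']) = false := by
        simpa using hs
      have lhs1 : stripLoopA cn u (p :: ps) = stripLoopA cn u ps := by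
        simp [stripLoopA, hs']
      rw [lhs1, ihr]
      by_cases hm : String.ofList (u.take n) ∈ ps
      · rw [if_pos hm, if_pos (List.mem_cons_of_mem _ hm)]
      · rw [if_neg hm, if_neg (by simp [List.mem_cons, hm, fun h => hne h])]

-- no prefix contains a space
theorem prefixes_no_space : ∀ p ∈ SHELVING_PREFIXES, ' ' ∉ p.toList := by decide

-- membership through the set B builds once
theorem contains_prefix_set (s : String) :
    PREFIX_SET.contains s = true ↔ s ∈ SHELVING_PREFIXES := by
  constructor
  · intro h
    exact (PySem.Set.mem_ofList _ _).mp (by simpa [PySem.Set.contains] using h)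
  · intro h
    simpa [PySem.Set.contains] using (PySem.Set.mem_ofList _ _).mpr h

-- ===== VERDICT (by name: the statement is the Claim_ definition above) =====
theorem strip_shelving_prefix_spec : Claim_equal_strip_shelving_prefix := by
  intro cn _
  unfold Spec_strip_shelving_prefix
  by_cases hsp : PySem.Chars.find (PySem.Chars.upper cn.toList) [' '] = -1
  · -- no space anywhere: no prefix can match
    have hinf : ¬ [' '] <:+: PySem.Chars.upper cn.toList :=
      (PySem.Chars.find_eq_neg_one_iff _ _).mp hsp
    have hA : strip_shelving_prefix cn = (cn, none) := by
      apply stripLoopA_no_match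
      intro p _
      rw [Bool.eq_false_iff]
      intro hstart
      apply hinf
      have h1 : p.toList ++ [' '] <+: PySem.Chars.upper cn.toList :=
        (PySem.Chars.startswith_iff _ _).mp hstart
      have h2 : [' '] <:+: p.toList ++ [' '] := ⟨p.toList, [], by simp⟩
      exact h2.trans h1.isInfix
    rw [hA]
    simp [strip_shelving_prefix_alt, hsp]
  · -- a first space exists at index n
    have hge : 0 ≤ PySem.Chars.find (PySem.Chars.upper cn.toList) [' '] := by
      have := PySem.Chars.neg_one_le_find (PySem.Chars.upper cn.toList) [' ']
      omega
    obtain ⟨hpre, hmin⟩ := PySem.Chars.find_spec hge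
    obtain ⟨k, hk⟩ : ∃ k : Nat, PySem.Chars.find (PySem.Chars.upper cn.toList) [' '] = (k : Int) :=
      ⟨_, (Int.toNat_of_nonneg hge).symm⟩
    obtain ⟨t, ht⟩ := hpre
    have hd : (PySem.Chars.upper cn.toList).drop
        (PySem.Chars.find (PySem.Chars.upper cn.toList) [' ']).toNat = ' ' :: t := by
      simpa using ht.symm
    have hnlen : (PySem.Chars.find (PySem.Chars.upper cn.toList) [' ']).toNat
        ≤ (PySem.Chars.upper cn.toList).length := by
      by_contra hgt
      push_neg at hgt
      have : (PySem.Chars.upper cn.toList).drop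
          (PySem.Chars.find (PySem.Chars.upper cn.toList) [' ']).toNat = [] :=
        List.drop_eq_nil_of_le (le_of_lt hgt)
      rw [hd] at this
      exact List.cons_ne_nil _ _ this
    have H : ∀ p ∈ SHELVING_PREFIXES,
        (PySem.Chars.startswith (PySem.Chars.upper cn.toList) (p.toList ++ [' ']) = true ↔
          p.toList = (PySem.Chars.upper cn.toList).take
            (PySem.Chars.find (PySem.Chars.upper cn.toList) [' ']).toNat) :=
      fun p hp => match_iff _ _ t p.toList (prefixes_no_space p hp) hd hmin
    have hA := stripLoopA_spec cn (PySem.Chars.upper cn.toList)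
      (PySem.Chars.find (PySem.Chars.upper cn.toList) [' ']).toNat hnlen SHELVING_PREFIXES H
    have hslice1 : PySem.Chars.slice (PySem.Chars.upper cn.toList) none
        (some (PySem.Chars.find (PySem.Chars.upper cn.toList) [' '])) =
        (PySem.Chars.upper cn.toList).take
          (PySem.Chars.find (PySem.Chars.upper cn.toList) [' ']).toNat := by
      rw [hk]
      simp [PySem.List.slice_to_natCast]
    have hslice2 : PySem.Chars.slice cn.toList
        (some (PySem.Chars.find (PySem.Chars.upper cn.toList) [' '])) none =
        cn.toList.drop (PySem.Chars.find (PySem.Chars.upper cn.toList) [' ']).toNat := by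
      rw [hk]
      simp [PySem.List.slice_from_natCast]
    have hB : strip_shelving_prefix_alt cn =
        if PREFIX_SET.contains (String.ofList ((PySem.Chars.upper cn.toList).take
            (PySem.Chars.find (PySem.Chars.upper cn.toList) [' ']).toNat)) then
          (if PySem.Chars.lstrip (cn.toList.drop
              (PySem.Chars.find (PySem.Chars.upper cn.toList) [' ']).toNat) ≠ [] then
            (String.ofList (PySem.Chars.lstrip (cn.toList.drop
                (PySem.Chars.find (PySem.Chars.upper cn.toList) [' ']).toNat)),
              some (String.ofList ((PySem.Chars.upper cn.toList).take
                (PySem.Chars.find (PySem.Chars.upper cn.toList) [' ']).toNat)))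
           else (cn, none))
        else (cn, none) := by
      simp only [strip_shelving_prefix_alt, if_neg hsp, hslice1, hslice2]
    unfold strip_shelving_prefix
    rw [hA, hB]
    by_cases hm : String.ofList ((PySem.Chars.upper cn.toList).take
        (PySem.Chars.find (PySem.Chars.upper cn.toList) [' ']).toNat) ∈ SHELVING_PREFIXES
    · rw [if_pos hm, if_pos ((contains_prefix_set _).mpr hm)]
    · rw [if_neg hm, if_neg (fun h => hm ((contains_prefix_set _).mp h))]
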